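-- pv_equiv track=rewrite | github.com/jaydu1/crispyx | benchmarking/tools/visualization.py | _order_heatmap_methods
-- ===== SOURCE A (Python) =====
-- HEATMAP_METHOD_ORDER = [
--     # t-test
--     "crispyx_de_t_test",
--     "scanpy_de_t_test",
--     # Wilcoxon
--     "crispyx_de_wilcoxon",
--     "scanpy_de_wilcoxon",
--     # NB-GLM (no shrinkage) - edgeR first as reference
--     "edger_de_glm",
--     "crispyx_de_nb_glm",
--     "pertpy_de_pydeseq2",
--     # NB-GLM (joint, no shrinkage)
--     "crispyx_de_nb_glm_joint",
--     # NB-GLM (with shrinkage)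
--     "crispyx_de_nb_glm_shrunk",
--     "crispyx_de_nb_glm_joint_shrunk",
--     "pertpy_de_pydeseq2_shrunk",
-- ]
--
-- def _order_heatmap_methods(methods: list[str]) -> list[str]:
--     """Order methods for heatmap display.
--
--     Parameters
--     ----------
--     methods : list[str]
--         List of method names
--
--     Returns
--     -------
--     list[str]
--         Ordered list of method names
--     """
--     ordered = []
--     # First add methods in the predefined order
--     for m in HEATMAP_METHOD_ORDER:
--         if m in methods:
--             ordered.append(m)
--     # Then add any remaining methods not in the predefined order
--     for m in methods:
--         if m not in ordered:
--             ordered.append(m)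
--     return ordered
-- ===== SOURCE B (Python) =====
-- HEATMAP_METHOD_ORDER = [
--     "crispyx_de_t_test",
--     "scanpy_de_t_test",
--     "crispyx_de_wilcoxon",
--     "scanpy_de_wilcoxon",
--     "edger_de_glm",
--     "crispyx_de_nb_glm",
--     "pertpy_de_pydeseq2",
--     "crispyx_de_nb_glm_joint",
--     "crispyx_de_nb_glm_shrunk",
--     "crispyx_de_nb_glm_joint_shrunk",
--     "pertpy_de_pydeseq2_shrunk",
-- ]
--
-- _RANK = {name: i for i, name in enumerate(HEATMAP_METHOD_ORDER)}
--
--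
-- def _order_heatmap_methods(methods: list[str]) -> list[str]:
--     """Rank-table + stable sort: dedupe the input keeping first occurrences,
--     then stable-sort by the predefined rank (extras share the sentinel rank,
--     so stability keeps them in first-occurrence order after the known ones)."""
--     unique = list(dict.fromkeys(methods))
--     n = len(HEATMAP_METHOD_ORDER)
--     return sorted(unique, key=lambda m: _RANK.get(m, n))
-- ===== Notes on version B (the rewrite author's own statement) =====
-- stated objective: faster
-- what changed: Replaced A's two membership-scanning passes (predefined list filtered against the input, then the input scanned against the growing output list) by a rank-table lookup plus one stable sort: dedupe the input with dict.fromkeys and stable-sort it by predefined rank, extras sharing a sentinel rank so stability keeps their first-occurrence order.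
import Mathlib
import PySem

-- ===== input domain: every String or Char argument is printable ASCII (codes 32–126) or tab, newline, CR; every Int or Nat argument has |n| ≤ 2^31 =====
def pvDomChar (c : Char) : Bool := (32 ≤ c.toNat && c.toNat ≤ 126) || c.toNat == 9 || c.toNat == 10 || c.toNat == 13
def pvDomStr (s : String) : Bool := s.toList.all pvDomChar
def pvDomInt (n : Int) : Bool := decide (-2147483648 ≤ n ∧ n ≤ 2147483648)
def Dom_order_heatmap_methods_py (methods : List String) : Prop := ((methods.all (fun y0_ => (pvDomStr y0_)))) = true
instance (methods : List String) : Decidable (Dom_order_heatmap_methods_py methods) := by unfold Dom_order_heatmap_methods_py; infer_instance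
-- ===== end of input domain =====

-- B replaces A's two membership-scanning passes by a rank table + dedupe + one stable sort by rank (extras share a sentinel rank, so stability keeps their first-occurrence order).

-- ===== PORT A =====
def HMO : List String :=
  ["crispyx_de_t_test", "scanpy_de_t_test",
   "crispyx_de_wilcoxon", "scanpy_de_wilcoxon",
   "edger_de_glm", "crispyx_de_nb_glm", "pertpy_de_pydeseq2",
   "crispyx_de_nb_glm_joint",
   "crispyx_de_nb_glm_shrunk", "crispyx_de_nb_glm_joint_shrunk", "pertpy_de_pydeseq2_shrunk"]

def order_heatmap_methods_py (methods : List String) : List String :=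
  -- ordered = []; for m in HEATMAP_METHOD_ORDER: if m in methods: ordered.append(m)
  let ordered := HMO.foldl (fun acc m => if m ∈ methods then acc ++ [m] else acc) []
  -- for m in methods: if m not in ordered: ordered.append(m)
  methods.foldl (fun acc m => if m ∈ acc then acc else acc ++ [m]) ordered

-- ===== PORT B =====
-- _RANK = {name: i for i, name in enumerate(HEATMAP_METHOD_ORDER)}
def RANK : PySem.Dict String Int :=
  (PySem.List.enumerate HMO 0).foldl (fun d p => d.insert p.2 p.1) PySem.Dict.empty

-- unique = list(dict.fromkeys(methods)); return sorted(unique, key=lambda m: _RANK.get(m, n))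
def order_heatmap_methods_py_alt (methods : List String) : List String :=
  let unique := PySem.List.dedup methods
  let n : Int := (HMO.length : Int)
  PySem.List.sorted unique (fun m => RANK.getD m n) false

-- ===== PRECONDITION & SPEC =====
def Spec_order_heatmap_methods_py (methods : List String) (out : List String) : Prop := out = order_heatmap_methods_py_alt methods
instance (methods : List String) (out : List String) : Decidable (Spec_order_heatmap_methods_py methods out) := by unfold Spec_order_heatmap_methods_py; infer_instance

-- ===== CLAIM (what is proved, stated in full; the proofs are below) =====
def Claim_equal_order_heatmap_methods_py : Prop := ∀ (methods : List String), Dom_order_heatmap_methods_py methods → Spec_order_heatmap_methods_py methods (order_heatmap_methods_py methods)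

-- ===== LEMMAS AND PROOFS =====

-- proof-side closed form of the rank key
def mkey (m : String) : Int :=
  if "crispyx_de_t_test" = m then 0
  else if "scanpy_de_t_test" = m then 1
  else if "crispyx_de_wilcoxon" = m then 2
  else if "scanpy_de_wilcoxon" = m then 3
  else if "edger_de_glm" = m then 4
  else if "crispyx_de_nb_glm" = m then 5
  else if "pertpy_de_pydeseq2" = m then 6
  else if "crispyx_de_nb_glm_joint" = m then 7
  else if "crispyx_de_nb_glm_shrunk" = m then 8
  else if "crispyx_de_nb_glm_joint_shrunk" = m then 9
  else if "pertpy_de_pydeseq2_shrunk" = m then 10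
  else 11

theorem RANK_eq : RANK = PySem.Dict.mk
    [("crispyx_de_t_test",0),("scanpy_de_t_test",1),("crispyx_de_wilcoxon",2),("scanpy_de_wilcoxon",3),
     ("edger_de_glm",4),("crispyx_de_nb_glm",5),("pertpy_de_pydeseq2",6),("crispyx_de_nb_glm_joint",7),
     ("crispyx_de_nb_glm_shrunk",8),("crispyx_de_nb_glm_joint_shrunk",9),("pertpy_de_pydeseq2_shrunk",10)] := by
  simp [RANK, HMO, PySem.List.enumerate_cons, PySem.List.enumerate_nil, PySem.Dict.insert, PySem.Dict.empty]

theorem key_eq (m : String) : RANK.getD m ((HMO.length : Int)) = mkey m := by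
  rw [RANK_eq]
  unfold mkey
  split_ifs with h1 h2 h3 h4 h5 h6 h7 h8 h9 h10 h11
  · subst h1; decide
  · subst h2; decide
  · subst h3; decide
  · subst h4; decide
  · subst h5; decide
  · subst h6; decide
  · subst h7; decide
  · subst h8; decide
  · subst h9; decide
  · subst h10; decide
  · subst h11; decide
  · simp [PySem.Dict.getD, PySem.Dict.get?, beq_iff_eq, HMO,
      h1, h2, h3, h4, h5, h6, h7, h8, h9, h10, h11]

theorem mkey_nonneg (m : String) : 0 ≤ mkey m := by
  unfold mkey; split_ifs <;> norm_num

theorem mkey_le (m : String) : mkey m ≤ 11 := by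
  unfold mkey; split_ifs <;> norm_num

theorem mkey_eq_eleven_iff (m : String) : mkey m = 11 ↔ m ∉ HMO := by
  unfold mkey HMO
  split_ifs with h1 h2 h3 h4 h5 h6 h7 h8 h9 h10 h11 <;> simp_all
  exact ⟨fun h => h1 h.symm, fun h => h2 h.symm, fun h => h3 h.symm, fun h => h4 h.symm,
    fun h => h5 h.symm, fun h => h6 h.symm, fun h => h7 h.symm, fun h => h8 h.symm,
    fun h => h9 h.symm, fun h => h10 h.symm, fun h => h11 h.symm⟩

set_option maxHeartbeats 2000000 in
theorem mkey_index (m : String) : ∀ j : Nat, j < 11 → (mkey m = (j : Int) ↔ HMO[j]? = some m) := by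
  unfold mkey
  split_ifs with h1 h2 h3 h4 h5 h6 h7 h8 h9 h10 h11
  · subst h1; decide
  · subst h2; decide
  · subst h3; decide
  · subst h4; decide
  · subst h5; decide
  · subst h6; decide
  · subst h7; decide
  · subst h8; decide
  · subst h9; decide
  · subst h10; decide
  · subst h11; decide
  · intro j hj
    constructor
    · intro h; exfalso; omega
    · intro h
      exfalso
      interval_cases j <;> simp_all [HMO]

-- buckets: concatenation of the key classes in key order (what a stable sort by mkey produces)
def buckets (u : List String) : List String :=
  (List.range 12).flatMap (fun (k : Nat) => u.filter (fun m => decide (mkey m = (k : Int))))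

theorem insertBy_middle (key : String → Int) (x : String) (l1 l2 : List String)
    (h1 : ∀ y ∈ l1, key y ≤ key x) (h2 : ∀ y ∈ l2, key x < key y) :
    PySem.List.insertBy (fun a b => decide (key a < key b)) x (l1 ++ l2) = l1 ++ x :: l2 := by
  induction l1 with
  | nil =>
    cases l2 with
    | nil => simp [PySem.List.insertBy]
    | cons y ys =>
      have := h2 y (List.mem_cons_self ..)
      simp [PySem.List.insertBy, this]
  | cons a l1 ih =>
    have ha : ¬ key x < key a := not_lt.mpr (h1 a (List.mem_cons_self ..))
    simp only [List.cons_append, PySem.List.insertBy, decide_eq_true_eq, if_neg ha]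
    rw [ih (fun y hy => h1 y (List.mem_cons_of_mem _ hy))]

theorem sorted_eq_buckets (u : List String) :
    PySem.List.sorted u mkey false = buckets u := by
  rw [PySem.List.sorted_eq_foldl_insertBy]
  induction u using List.reverseRecOn with
  | nil => simp [buckets]
  | append_singleton u x ih =>
    rw [List.foldl_append, List.foldl_cons, List.foldl_nil, ih]
    set t : Nat := (mkey x).toNat with htdef
    have ht : (t : Int) = mkey x := Int.toNat_of_nonneg (mkey_nonneg x)
    have ht11 : t ≤ 11 := by
      have := mkey_le x; omega
    have hsplit : (12 : Nat) = (t + 1) + (11 - t) := by omega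
    set f : Nat → List String := fun k => u.filter (fun m => decide (mkey m = (k : Int))) with hf
    set g : Nat → List String := fun k => (u ++ [x]).filter (fun m => decide (mkey m = (k : Int))) with hg
    have hgf : ∀ k : Nat, g k = f k ++ (if mkey x = (k : Int) then [x] else []) := by
      intro k
      simp only [hg, hf, List.filter_append, List.filter_cons, List.filter_nil]
      split_ifs with h <;> simp_all
    have hL : buckets u = (List.range (t+1)).flatMap f ++ ((List.range (11-t)).map (fun j => (t+1) + j)).flatMap f := by
      rw [buckets, ← hf, hsplit, List.range_add, List.flatMap_append]
    have hlow : ∀ y ∈ (List.range (t+1)).flatMap f, mkey y ≤ mkey x := by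
      intro y hy
      obtain ⟨k, hk, hy⟩ := List.mem_flatMap.mp hy
      have := List.mem_range.mp hk
      have hkey : mkey y = (k : Int) := by
        have := List.mem_filter.mp hy; simpa using this.2
      omega
    have hhigh : ∀ y ∈ ((List.range (11-t)).map (fun j => (t+1) + j)).flatMap f, mkey x < mkey y := by
      intro y hy
      obtain ⟨k, hk, hy⟩ := List.mem_flatMap.mp hy
      obtain ⟨j, hj, rfl⟩ := List.mem_map.mp hk
      have hkey : mkey y = ((t+1+j : Nat) : Int) := by
        have := List.mem_filter.mp hy; simpa using this.2
      push_cast at hkey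
      omega
    rw [hL, insertBy_middle mkey x _ _ hlow hhigh]
    have hRL : (List.range (t+1)).flatMap g = (List.range (t+1)).flatMap f ++ [x] := by
      rw [List.range_succ, List.flatMap_append, List.flatMap_append]
      have h1 : (List.range t).flatMap g = (List.range t).flatMap f := by
        apply List.flatMap_congr
        intro k hk
        have hkt := List.mem_range.mp hk
        rw [hgf k, if_neg (by omega), List.append_nil]
      have h2 : List.flatMap g [t] = List.flatMap f [t] ++ [x] := by
        simp only [List.flatMap_cons, List.flatMap_nil, List.append_nil]
        rw [hgf t, if_pos ht.symm]
      rw [h1, h2, List.append_assoc]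
    have hRH : ((List.range (11-t)).map (fun j => (t+1) + j)).flatMap g
        = ((List.range (11-t)).map (fun j => (t+1) + j)).flatMap f := by
      apply List.flatMap_congr
      intro k hk
      obtain ⟨j, hj, rfl⟩ := List.mem_map.mp hk
      rw [hgf, if_neg (by push_cast; omega), List.append_nil]
    have hB : buckets (u ++ [x]) = (List.range (t+1)).flatMap g ++ ((List.range (11-t)).map (fun j => (t+1) + j)).flatMap g := by
      rw [buckets, ← hg, hsplit, List.range_add, List.flatMap_append]
    rw [hB, hRL, hRH, List.append_assoc, List.singleton_append]

-- a Nodup list filtered to the elements equal to c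
theorem filter_eq_single {c : String} (p : String → Bool) (hp : ∀ m, p m = true ↔ m = c) :
    ∀ (u : List String), u.Nodup → u.filter p = if c ∈ u then [c] else [] := by
  intro u
  induction u with
  | nil => simp
  | cons a u ih =>
    intro hnd
    obtain ⟨hna, hnd⟩ := List.nodup_cons.mp hnd
    rw [List.filter_cons]
    by_cases hac : a = c
    · subst hac
      rw [if_pos ((hp a).mpr rfl), ih hnd, if_neg hna, if_pos (List.mem_cons_self ..)]
    · have : ¬ p a = true := fun h => hac ((hp a).mp h)
      rw [if_neg this, ih hnd]
      have : (c ∈ a :: u) ↔ c ∈ u := by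
        simp [List.mem_cons]
        intro h; exact absurd h.symm hac
      by_cases hcu : c ∈ u
      · rw [if_pos hcu, if_pos (List.mem_cons_of_mem _ hcu)]
      · rw [if_neg hcu, if_neg (fun h => hcu (this.mp h))]

-- the sorted low part (ranks 0..10) is the predefined list filtered by membership
theorem low_eq_aux : ∀ (L : List String) (h : String → Int) (u : List String), u.Nodup →
    (∀ j : Nat, j < L.length → ∀ m, (h m = (j : Int) ↔ L[j]? = some m)) →
    (List.range L.length).flatMap (fun (k : Nat) => u.filter (fun m => decide (h m = (k : Int)))) =
      L.filter (fun c => decide (c ∈ u)) := by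
  intro L
  induction L with
  | nil => simp
  | cons c L ihL =>
    intro h u hnd H
    rw [List.length_cons, List.range_succ_eq_map, List.flatMap_cons, List.flatMap_map]
    have h0 : u.filter (fun m => decide (h m = ((0:Nat) : Int))) = if c ∈ u then [c] else [] := by
      apply filter_eq_single _ _ u hnd
      intro m
      rw [decide_eq_true_iff, H 0 (by simp) m]
      simp only [List.getElem?_cons_zero, Option.some_inj]
      exact eq_comm
    have htail : (List.range L.length).flatMap (fun (a : Nat) => u.filter (fun m => decide (h m = ((a.succ : Nat) : Int)))) =
        L.filter (fun c => decide (c ∈ u)) := by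
      have hstep : ∀ j : Nat, j < L.length → ∀ m : String, ((fun m => h m - 1) m = (j : Int) ↔ L[j]? = some m) := by
        intro j hj m
        have hH := H (j+1) (by simp only [List.length_cons]; omega) m
        simp only [List.getElem?_cons_succ] at hH
        rw [← hH]
        simp only []
        push_cast
        constructor <;> intro <;> omega
      have hih := ihL (fun m => h m - 1) u hnd hstep
      rw [← hih]
      apply List.flatMap_congr
      intro k _
      apply List.filter_congr
      intro m _
      simp only [decide_eq_decide]
      push_cast
      omega
    rw [h0, htail, List.filter_cons]
    by_cases hcu : c ∈ u
    · rw [if_pos hcu, if_pos (by simpa using hcu)]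
      rfl
    · rw [if_neg hcu, if_neg (by simpa using hcu)]
      rfl

-- filter p commutes with the dedup fold
theorem filter_foldl_add (p : String → Bool) :
    ∀ (xs : List String) (s : List String),
      (xs.foldl PySem.Set.add s).filter p = (xs.filter p).foldl PySem.Set.add (s.filter p) := by
  intro xs
  induction xs with
  | nil => intro s; rfl
  | cons x xs ih =>
    intro s
    rw [List.foldl_cons, ih, List.filter_cons]
    by_cases hp : p x = true
    · rw [if_pos hp, List.foldl_cons]
      congr 1
      unfold PySem.Set.add
      by_cases hx : x ∈ s
      · rw [if_pos (by simpa [List.contains_iff_mem] using hx),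
            if_pos (by simp [List.mem_filter, hx, hp])]
      · rw [if_neg (by simpa [List.contains_iff_mem] using hx),
            if_neg (by simp [List.mem_filter, hx]),
            List.filter_append, List.filter_cons, if_pos hp, List.filter_nil]
    · rw [if_neg hp]
      congr 1
      unfold PySem.Set.add
      split_ifs with h
      · rfl
      · rw [List.filter_append, List.filter_cons, if_neg hp, List.filter_nil, List.append_nil]

-- A's second loop with the if-membership accumulator IS the Set.add fold
theorem foldl_if_eq_foldl_add :
    ∀ (xs : List String) (s : List String),
      xs.foldl (fun acc m => if m ∈ acc then acc else acc ++ [m]) s = xs.foldl PySem.Set.add s := by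
  intro xs
  induction xs with
  | nil => intro s; rfl
  | cons x xs ih =>
    intro s
    simp only [List.foldl_cons, ih]
    congr 1
    simp [PySem.Set.add]

-- A's first loop builds the predefined-order filter of the input
theorem ordered_eq_filter (methods : List String) :
    HMO.foldl (fun acc m => if m ∈ methods then acc ++ [m] else acc) [] =
      HMO.filter (fun m => decide (m ∈ methods)) := by
  simpa using PySem.List.foldl_append_ite_eq_filter (l := HMO) (p := fun m => m ∈ methods) (acc := [])

-- A's second loop splits: predefined names are already in acc0, extras accumulate separately
theorem loop_split :
    ∀ (ms acc0 ex : List String),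
      (∀ m ∈ ms, m ∈ HMO → m ∈ acc0) → (∀ y ∈ ex, y ∉ acc0) → (∀ y ∈ acc0, y ∈ HMO) →
      ms.foldl (fun acc m => if m ∈ acc then acc else acc ++ [m]) (acc0 ++ ex) =
        acc0 ++ (ms.filter (fun m => !decide (m ∈ HMO))).foldl
          (fun acc m => if m ∈ acc then acc else acc ++ [m]) ex := by
  intro ms
  induction ms with
  | nil => intro acc0 ex _ _ _; simp
  | cons m ms ih =>
    intro acc0 ex h1 h2 h3
    rw [List.foldl_cons, List.filter_cons]
    by_cases hm : m ∈ HMO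
    · have hma : m ∈ acc0 := h1 m (List.mem_cons_self ..) hm
      rw [if_pos (List.mem_append.mpr (Or.inl hma)), if_neg (by simp [hm])]
      exact ih acc0 ex (fun y hy => h1 y (List.mem_cons_of_mem _ hy)) h2 h3
    · have hma : m ∉ acc0 := fun h => hm (h3 m h)
      rw [if_pos (show (!decide (m ∈ HMO)) = true by simp [hm]), List.foldl_cons]
      by_cases hex : m ∈ ex
      · rw [if_pos (List.mem_append.mpr (Or.inr hex)), if_pos hex]
        exact ih acc0 ex (fun y hy => h1 y (List.mem_cons_of_mem _ hy)) h2 h3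
      · rw [if_neg (by simp [hma, hex]), if_neg hex, List.append_assoc]
        exact ih acc0 (ex ++ [m]) (fun y hy => h1 y (List.mem_cons_of_mem _ hy))
          (by intro y hy; rcases List.mem_append.mp hy with h | h
              · exact h2 y h
              · simp at h; subst h; exact hma) h3

-- ===== VERDICT (by name: the statement is the Claim_ definition above) =====
theorem order_heatmap_methods_py_spec : Claim_equal_order_heatmap_methods_py := by
  intro methods _
  unfold Spec_order_heatmap_methods_py
  show (methods.foldl (fun acc m => if m ∈ acc then acc else acc ++ [m])
      (HMO.foldl (fun acc m => if m ∈ methods then acc ++ [m] else acc) [])) =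
    PySem.List.sorted (PySem.List.dedup methods) (fun m => RANK.getD m ((HMO.length : Int))) false
  -- B side: key is mkey, dedup is the Set.ofList fold
  have hkeyfun : (fun m => RANK.getD m ((HMO.length : Int))) = mkey := funext key_eq
  rw [hkeyfun]
  set u : List String := PySem.List.dedup methods with hu
  have hnd : u.Nodup := by rw [hu, PySem.List.dedup_eq_ofList]; exact PySem.Set.nodup_ofList (xs := methods)
  have hmemu : ∀ m, m ∈ u ↔ m ∈ methods := by
    intro m; rw [hu]; exact PySem.List.mem_dedup ..
  rw [sorted_eq_buckets u]
  -- split the buckets into ranks 0..10 and the sentinel rank 11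
  have hbuck : buckets u = HMO.filter (fun c => decide (c ∈ u)) ++ u.filter (fun m => decide (mkey m = (11 : Int))) := by
    have h12 : (12 : Nat) = 11 + 1 := rfl
    rw [buckets, h12, List.range_succ, List.flatMap_append, List.flatMap_cons, List.flatMap_nil, List.append_nil]
    congr 1
    · have := low_eq_aux HMO mkey u hnd (fun j hj m => mkey_index m j (by simpa [HMO] using hj))
      simpa [HMO] using this
  rw [hbuck]
  -- A side
  rw [ordered_eq_filter methods]
  have hA : methods.foldl (fun acc m => if m ∈ acc then acc else acc ++ [m])
        (HMO.filter (fun m => decide (m ∈ methods))) =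
      HMO.filter (fun m => decide (m ∈ methods)) ++
        (methods.filter (fun m => !decide (m ∈ HMO))).foldl
          (fun acc m => if m ∈ acc then acc else acc ++ [m]) [] := by
    have := loop_split methods (HMO.filter (fun m => decide (m ∈ methods))) []
      (fun m hm hH => List.mem_filter.mpr ⟨hH, by simpa using hm⟩)
      (by simp)
      (fun y hy => (List.mem_filter.mp hy).1)
    simpa using this
  rw [hA]
  congr 1
  · apply List.filter_congr
    intro c _
    simp [hmemu c]
  · -- extras: the fold over filtered input is the filtered dedup
    rw [foldl_if_eq_foldl_add]
    have hofl : u = methods.foldl PySem.Set.add [] := by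
      rw [hu, PySem.List.dedup_eq_ofList]; rfl
    rw [hofl]
    have hpt : ∀ m ∈ methods.foldl PySem.Set.add [], (decide (mkey m = (11 : Int))) = (!decide (m ∈ HMO)) := by
      intro m _
      simp [mkey_eq_eleven_iff m]
    rw [List.filter_congr hpt, filter_foldl_add (fun m => !decide (m ∈ HMO)) methods []]
    simp
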